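-- pv_equiv track=rewrite | github.com/chboishabba/dashitest | trading/scripts/plot_temporal_homology.py | slice_components
-- ===== SOURCE A (Python) =====
-- def slice_components(mask_slice):
--     """Return list of (start_idx, end_idx) contiguous 1-runs in a 1D binary mask."""
--     comps = []
--     in_run = False
--     start = 0
--     for i, v in enumerate(mask_slice):
--         if v and not in_run:
--             start = i
--             in_run = True
--         if not v and in_run:
--             comps.append((start, i - 1))
--             in_run = False
--     if in_run:
--         comps.append((start, len(mask_slice) - 1))
--     return comps
-- ===== SOURCE B (Python) =====
-- from itertools import groupby
--
-- def slice_components(mask_slice):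
--     """Return list of (start_idx, end_idx) contiguous 1-runs in a 1D binary mask."""
--     comps = []
--     idx = 0
--     for is_one, group in groupby(mask_slice, key=bool):
--         length = sum(1 for _ in group)
--         if is_one:
--             comps.append((idx, idx + length - 1))
--         idx += length
--     return comps
-- ===== Notes on version B (the rewrite author's own statement) =====
-- stated objective: idiomatic
-- what changed: Replaced the in_run flag machine with a post-loop flush by an itertools.groupby over bool-truthiness that emits one (start, start+len-1) pair per truthy group while advancing a running index.
import Mathlib
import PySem

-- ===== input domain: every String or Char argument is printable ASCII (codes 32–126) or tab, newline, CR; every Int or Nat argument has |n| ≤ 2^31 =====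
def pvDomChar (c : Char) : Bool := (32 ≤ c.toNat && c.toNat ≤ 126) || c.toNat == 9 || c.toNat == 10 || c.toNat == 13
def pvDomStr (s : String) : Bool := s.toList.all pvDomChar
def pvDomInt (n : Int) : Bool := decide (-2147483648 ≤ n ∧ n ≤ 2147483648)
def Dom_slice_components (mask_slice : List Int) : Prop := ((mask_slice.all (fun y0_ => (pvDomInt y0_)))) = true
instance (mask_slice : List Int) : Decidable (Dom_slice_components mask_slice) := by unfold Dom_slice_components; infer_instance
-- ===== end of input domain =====

-- B replaces A's in_run flag machine and post-loop flush with an itertools.groupby-style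
-- pass that emits one pair per truthy group (idiomatic decomposition; same O(n) cost).


-- ===== PORT A =====
-- state: (comps, in_run, start); the two sequential ifs of A's loop body kept in order
def sliceAStep (st : List (Int × Int) × Bool × Int) (iv : Int × Int) : List (Int × Int) × Bool × Int :=
  let (comps, in_run, start) := st
  let (i, v) := iv
  let (in_run, start) := if v ≠ 0 ∧ in_run = false then (true, i) else (in_run, start)
  let (comps, in_run) := if v = 0 ∧ in_run = true then (comps ++ [(start, i - 1)], false) else (comps, in_run)
  (comps, in_run, start)

def slice_components (mask_slice : List Int) : List (Int × Int) :=
  let st := (PySem.List.enumerate mask_slice).foldl sliceAStep ([], false, 0)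
  if st.2.1 = true then st.1 ++ [(st.2.2, (mask_slice.length : Int) - 1)] else st.1

-- ===== PORT B =====
-- groupby(mask_slice, key=bool): each step consumes one maximal equal-truthiness group,
-- emits (idx, idx+length-1) if the group is truthy, and advances idx by the group length.
def sliceGroups (idx : Int) (l : List Int) : List (Int × Int) :=
  match l with
  | [] => []
  | v :: tl =>
    let grp := tl.takeWhile (fun w => decide (w ≠ 0) == decide (v ≠ 0))
    let rest := tl.dropWhile (fun w => decide (w ≠ 0) == decide (v ≠ 0))
    let length : Int := 1 + grp.length
    if v ≠ 0 then (idx, idx + length - 1) :: sliceGroups (idx + length) rest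
    else sliceGroups (idx + length) rest
termination_by l.length
decreasing_by
  all_goals exact Nat.lt_of_le_of_lt (List.length_dropWhile_le _ _) (by simp)

def slice_components_alt (mask_slice : List Int) : List (Int × Int) :=
  sliceGroups 0 mask_slice

-- ===== PRECONDITION & SPEC =====
def Spec_slice_components (mask_slice : List Int) (out : List (Int × Int)) : Prop := out = slice_components_alt mask_slice
instance (mask_slice : List Int) (out : List (Int × Int)) : Decidable (Spec_slice_components mask_slice out) := by unfold Spec_slice_components; infer_instance

-- ===== CLAIM (what is proved, stated in full; the proofs are below) =====
def Claim_equal_slice_components : Prop := ∀ (mask_slice : List Int), Dom_slice_components mask_slice → Spec_slice_components mask_slice (slice_components mask_slice)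

-- ===== LEMMAS AND PROOFS =====

theorem sg_nil (i : Int) : sliceGroups i [] = [] := by rw [sliceGroups.eq_def]

theorem sg_pos (i v : Int) (tl : List Int) (hv : ¬ v = 0) :
    sliceGroups i (v :: tl) =
      (i, i + (1 + ((tl.takeWhile (fun w => decide ¬(w = 0))).length : Int)) - 1) ::
        sliceGroups (i + (1 + ((tl.takeWhile (fun w => decide ¬(w = 0))).length : Int)))
          (tl.dropWhile (fun w => decide ¬(w = 0))) := by
  rw [sliceGroups.eq_def]
  simp [hv]

theorem sg_zero (i : Int) (tl : List Int) :
    sliceGroups i (0 :: tl) =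
      sliceGroups (i + (1 + ((tl.takeWhile (fun w => decide (w = 0))).length : Int)))
        (tl.dropWhile (fun w => decide (w = 0))) := by
  rw [sliceGroups.eq_def]
  simp

-- consuming a single falsy element one step at a time agrees with consuming its whole group
theorem sg_zero_step (tl : List Int) (i : Int) :
    sliceGroups i (0 :: tl) = sliceGroups (i + 1) tl := by
  match tl with
  | [] => simp [sg_zero, sg_nil]
  | w :: u =>
    by_cases hw : w = 0
    · subst hw
      rw [sg_zero i, sg_zero (i + 1)]
      simp only [List.takeWhile, List.dropWhile, decide_true]
      norm_num
      congr 1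
      ring
    · rw [sg_zero]
      simp [List.takeWhile, List.dropWhile, hw]

-- A's loop on the suffix l starting at index i, followed by the flush at index i + l.length
def sliceAFin (i : Int) (l : List Int) (acc : List (Int × Int)) (in_run : Bool) (s : Int) : List (Int × Int) :=
  let st := (PySem.List.enumerate l i).foldl sliceAStep (acc, in_run, s)
  if st.2.1 = true then st.1 ++ [(st.2.2, i + (l.length : Int) - 1)] else st.1

theorem sliceAFin_main (l : List Int) (i : Int) (acc : List (Int × Int)) (s : Int) :
    sliceAFin i l acc false s = acc ++ sliceGroups i l ∧
    ∀ s', sliceAFin i l acc true s' =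
      acc ++ (s', i + ((l.takeWhile (fun w => decide ¬(w = 0))).length : Int) - 1)
        :: sliceGroups (i + ((l.takeWhile (fun w => decide ¬(w = 0))).length : Int))
             (l.dropWhile (fun w => decide ¬(w = 0))) := by
  induction l generalizing i acc s with
  | nil =>
    constructor
    · simp [sliceAFin, sg_nil, PySem.List.enumerate]
    · intro s'
      simp [sliceAFin, PySem.List.enumerate, sg_nil]
  | cons v tl ih =>
    have hlen : ((tl.length + 1 : Nat) : Int) = (tl.length : Int) + 1 := by push_cast; ring
    constructor
    · by_cases hv : v = 0
      · subst hv
        have h0 := (ih (i + 1) acc s).1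
        rw [sliceAFin, PySem.List.enumerate_cons, List.foldl_cons]
        rw [show sliceAStep (acc, false, s) (i, 0) = (acc, false, s) by
          simp [sliceAStep]]
        rw [sliceAFin] at h0
        simp only [List.length_cons, hlen]
        rw [show i + ((tl.length : Int) + 1) - 1 = i + 1 + (tl.length : Int) - 1 by ring]
        rw [h0, sg_zero_step]
      · have h1 := (ih (i + 1) acc s).2 i
        rw [sliceAFin, PySem.List.enumerate_cons, List.foldl_cons]
        rw [show sliceAStep (acc, false, s) (i, v) = (acc, true, i) by
          simp [sliceAStep, hv]]
        rw [sliceAFin] at h1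
        simp only [List.length_cons, hlen]
        rw [show i + ((tl.length : Int) + 1) - 1 = i + 1 + (tl.length : Int) - 1 by ring]
        rw [h1, sg_pos i v tl hv]
        rw [show i + (1 + ((tl.takeWhile (fun w => decide ¬(w = 0))).length : Int))
              = i + 1 + ((tl.takeWhile (fun w => decide ¬(w = 0))).length : Int) by ring]
    · intro s'
      by_cases hv : v = 0
      · subst hv
        have h0 := (ih (i + 1) (acc ++ [(s', i - 1)]) s').1
        rw [sliceAFin, PySem.List.enumerate_cons, List.foldl_cons]
        rw [show sliceAStep (acc, true, s') (i, 0) = (acc ++ [(s', i - 1)], false, s') by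
          simp [sliceAStep]]
        rw [sliceAFin] at h0
        simp only [List.length_cons, hlen]
        rw [show i + ((tl.length : Int) + 1) - 1 = i + 1 + (tl.length : Int) - 1 by ring]
        rw [h0]
        simp only [List.takeWhile, List.dropWhile]
        norm_num
        rw [sg_zero_step]
      · have h1 := (ih (i + 1) acc s').2 s'
        rw [sliceAFin, PySem.List.enumerate_cons, List.foldl_cons]
        rw [show sliceAStep (acc, true, s') (i, v) = (acc, true, s') by
          simp [sliceAStep, hv]]
        rw [sliceAFin] at h1
        simp only [List.length_cons, hlen]
        rw [show i + ((tl.length : Int) + 1) - 1 = i + 1 + (tl.length : Int) - 1 by ring]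
        rw [h1]
        simp only [List.takeWhile, List.dropWhile, hv]
        norm_num
        refine ⟨by ring, ?_⟩
        congr 1
        ring

-- ===== VERDICT (by name: the statement is the Claim_ definition above) =====
theorem slice_components_spec : Claim_equal_slice_components := by
  intro l _
  show slice_components l = slice_components_alt l
  have h := (sliceAFin_main l 0 [] 0).1
  simp only [sliceAFin, zero_add] at h
  simpa [slice_components, slice_components_alt] using h
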